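-- pv_equiv track=rewrite | github.com/medbm5/neetcode-submissions-6s1v1ldt | Data Structures & Algorithms/maximum-product-difference-between-two-pairs/submission-0.py | maxProductDifference
-- ===== SOURCE A (Python) =====
-- from typing import List
--
-- def maxProductDifference(nums: List[int]) -> int:
--     mx=-float('inf')
--     mn=float('inf')
--     for i in range(len(nums)):
--         for j in range(i+1,len(nums)):
--
--             mx =max(nums[i]*nums[j],mx)
--             mn =min(nums[i]*nums[j],mn)
--
--
--     return mx-mn
-- ===== SOURCE B (Python) =====
-- from typing import List
--
-- def maxProductDifference(nums: List[int]) -> int: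
--     # Single pass: track the two largest (h1 >= h2) and two smallest (l1 <= l2)
--     # values; the extreme pairwise products are among products of these extremes.
--     x, y = nums[0], nums[1]
--     if x >= y:
--         h1, h2 = x, y
--     else:
--         h1, h2 = y, x
--     if x <= y:
--         l1, l2 = x, y
--     else:
--         l1, l2 = y, x
--     for v in nums[2:]:
--         if v >= h1:
--             h1, h2 = v, h1
--         elif v > h2:
--             h2 = v
--         if v <= l1:
--             l1, l2 = v, l1
--         elif v < l2:
--             l2 = v
--     return max(h1 * h2, l1 * l2) - min(l1 * l2, min(l1 * h1, h1 * h2))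
-- ===== Notes on version B (the rewrite author's own statement) =====
-- stated objective: faster
-- what changed: Replaced the O(n^2) scan over all pairs with a single O(n) pass tracking the two largest and two smallest values, combining their products for the extreme pairwise products.
-- outside the precondition, e.g. on maxProductDifference([5]): A returns -inf, B raises IndexError; on maxProductDifference([]): A returns -inf, B raises IndexError
import Mathlib
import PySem

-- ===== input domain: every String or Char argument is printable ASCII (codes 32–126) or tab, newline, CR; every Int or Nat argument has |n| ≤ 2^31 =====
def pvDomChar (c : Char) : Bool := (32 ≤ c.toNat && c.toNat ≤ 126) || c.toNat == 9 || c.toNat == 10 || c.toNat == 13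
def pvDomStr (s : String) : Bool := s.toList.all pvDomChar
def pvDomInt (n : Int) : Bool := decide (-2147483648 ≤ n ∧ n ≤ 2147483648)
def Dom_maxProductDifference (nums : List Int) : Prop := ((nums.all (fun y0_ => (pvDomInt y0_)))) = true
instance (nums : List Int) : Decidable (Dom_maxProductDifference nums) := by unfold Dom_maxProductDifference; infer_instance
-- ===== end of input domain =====

-- B replaces A's O(n^2) scan over all pairs by one pass tracking the two largest and
-- two smallest values; equivalence is proved for lists of length ≥ 2 (Pre_), where the
-- Python A returns an int at all.

-- ===== PORT A =====
-- loop body of A: update the running (mx, mn); none plays the role of -inf / +inf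
def stepP (st : Option Int × Option Int) (p : Int) : Option Int × Option Int :=
  (some (match st.1 with | none => p | some m => max p m),
   some (match st.2 with | none => p | some m => min p m))

def maxProductDifference (nums : List Int) : Int :=
  let n : Int := PySem.List.len nums
  let st := (PySem.List.pyRange 0 n 1).foldl (fun st i =>
      (PySem.List.pyRange (i+1) n 1).foldl (fun st j =>
        stepP st (PySem.List.pyGetD nums i 0 * PySem.List.pyGetD nums j 0)) st)
    ((none, none) : Option Int × Option Int)
  match st with
  | (some a, some b) => a - b
  | _ => 0  -- here Python returns -inf - inf (floats, not ints): excluded by Pre_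

-- ===== PORT B =====
-- loop body of B: update (h1, h2, l1, l2) = two largest, two smallest so far
def stepB (st : Int × Int × Int × Int) (v : Int) : Int × Int × Int × Int :=
  let hs := if st.1 ≤ v then (v, st.1) else if st.2.1 < v then (st.1, v) else (st.1, st.2.1)
  let ls := if v ≤ st.2.2.1 then (v, st.2.2.1) else if v < st.2.2.2 then (st.2.2.1, v) else (st.2.2.1, st.2.2.2)
  (hs.1, hs.2, ls.1, ls.2)

def maxProductDifference_alt (nums : List Int) : Int :=
  match nums with
  | x :: y :: rest =>
    let hi := if y ≤ x then (x, y) else (y, x)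
    let lo := if x ≤ y then (x, y) else (y, x)
    let st := rest.foldl stepB (hi.1, hi.2, lo.1, lo.2)
    max (st.1 * st.2.1) (st.2.2.1 * st.2.2.2) -
      min (st.2.2.1 * st.2.2.2) (min (st.2.2.1 * st.1) (st.1 * st.2.1))
  | _ => 0  -- Source B raises IndexError on lists of length < 2: excluded by Pre_

-- ===== PRECONDITION & SPEC =====
-- Pre_ excludes lists of length < 2: there A returns -float('inf') (a float, not an
-- int of the declared return type) and Source B raises IndexError.
def Pre_maxProductDifference (nums : List Int) : Prop := 2 ≤ nums.length
instance (nums : List Int) : Decidable (Pre_maxProductDifference nums) := by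
  unfold Pre_maxProductDifference; infer_instance
def pvWitness_maxProductDifference : List Int := [3, -1, 4, 1, -5]

def Spec_maxProductDifference (nums : List Int) (out : Int) : Prop := out = maxProductDifference_alt nums
instance (nums : List Int) (out : Int) : Decidable (Spec_maxProductDifference nums out) := by unfold Spec_maxProductDifference; infer_instance

-- ===== CLAIM (what is proved, stated in full; the proofs are below) =====
def Claim_equal_maxProductDifference : Prop := ∀ (nums : List Int), Dom_maxProductDifference nums → Pre_maxProductDifference nums → Spec_maxProductDifference nums (maxProductDifference nums)

-- ===== LEMMAS AND PROOFS =====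

-- all products nums[i]*nums[j] with i < j
def pairProds : List Int → List Int
  | [] => []
  | x :: xs => (xs.map (fun y => x * y)) ++ pairProds xs

-- (h1, h2) are the two largest elements of the multiset m (with multiplicity)
def Top2 (m : Multiset Int) (h1 h2 : Int) : Prop :=
  h2 ≤ h1 ∧ ∃ r, m = h1 ::ₘ h2 ::ₘ r ∧ ∀ x ∈ r, x ≤ h2

def Low2 (m : Multiset Int) (l1 l2 : Int) : Prop :=
  l1 ≤ l2 ∧ ∃ r, m = l1 ::ₘ l2 ::ₘ r ∧ ∀ x ∈ r, l2 ≤ x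

-- ---- A's nested index loops = a fold of stepP over pairProds ----

def auxA : List Int → (Option Int × Option Int) → (Option Int × Option Int)
  | [], st => st
  | x :: xs, st => auxA xs (xs.foldl (fun st y => stepP st (x * y)) st)

lemma outerA (nums : List Int) : ∀ (d k : Nat) (st : Option Int × Option Int),
    nums.length - k = d →
    (PySem.List.pyRange (k : Int) (PySem.List.len nums) 1).foldl (fun st i =>
      (PySem.List.pyRange (i+1) (PySem.List.len nums) 1).foldl (fun st j =>
        stepP st (PySem.List.pyGetD nums i 0 * PySem.List.pyGetD nums j 0)) st) st
      = auxA (nums.drop k) st := by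
  intro d
  induction d with
  | zero =>
    intro k st hk
    have hge : nums.length ≤ k := by omega
    rw [PySem.List.pyRange_one_eq_nil (by simp; exact_mod_cast hge),
      List.drop_eq_nil_of_le hge]
    rfl
  | succ d ih =>
    intro k st hk
    have hlt : k < nums.length := by omega
    rw [PySem.List.pyRange_one_cons (by simp; exact_mod_cast hlt)]
    simp only [List.foldl_cons]
    have htn : ((k : Int) + 1).toNat = k + 1 := by omega
    have hinner := PySem.List.foldl_pyRange_pyGetD (xs := nums) (a := (k : Int) + 1) (d := 0)
      (f := fun st y => stepP st (PySem.List.pyGetD nums (k : Int) 0 * y)) (init := st)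
      (by omega)
    rw [htn] at hinner
    rw [hinner]
    have hcast : ((k : Int) + 1) = ((k + 1 : Nat) : Int) := by push_cast; ring
    rw [hcast, ih (k + 1) _ (by omega)]
    have hget : PySem.List.pyGetD nums (k : Int) 0 = nums[k] := by
      rw [PySem.List.pyGetD_natCast]
      exact List.getD_eq_getElem nums 0 hlt
    rw [hget, ← List.getElem_cons_drop hlt]
    rfl

lemma auxA_eq_pairProds (l : List Int) : ∀ st, auxA l st = (pairProds l).foldl stepP st := by
  induction l with
  | nil => intro st; rfl
  | cons x xs ih =>
    intro st
    simp only [auxA, pairProds, List.foldl_append, ih, ← List.foldl_map]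

lemma foldl_stepP_some (L : List Int) : ∀ m n : Int,
    L.foldl stepP (some m, some n) = (some (L.foldl max m), some (L.foldl min n)) := by
  induction L with
  | nil => intro m n; rfl
  | cons p L ih =>
    intro m n
    simp only [List.foldl_cons, stepP, max_comm p m, min_comm p n, ih]

-- ---- pairProds vs. pairs of the multiset ----

lemma pairProds_mem_of_le {a b : Int} : ∀ (l : List Int),
    (a ::ₘ b ::ₘ 0) ≤ (l : Multiset Int) → a * b ∈ pairProds l := by
  intro l
  induction l with
  | nil =>
    intro h
    exact absurd (Multiset.card_le_card h) (by simp)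
  | cons x xs ih =>
    intro h
    simp only [pairProds, List.mem_append, List.mem_map]
    by_cases hax : a = x
    · subst hax
      rw [← Multiset.cons_coe, Multiset.cons_le_cons_iff] at h
      have hb : b ∈ xs := by
        have := Multiset.mem_of_le h (Multiset.mem_cons_self b 0)
        simpa using this
      exact Or.inl ⟨b, hb, rfl⟩
    · by_cases hbx : b = x
      · subst hbx
        rw [Multiset.cons_swap, ← Multiset.cons_coe, Multiset.cons_le_cons_iff] at h
        have ha : a ∈ xs := by
          have := Multiset.mem_of_le h (Multiset.mem_cons_self a 0)
          simpa using this
        exact Or.inl ⟨a, ha, mul_comm b a⟩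
      · have hxnot : x ∉ (a ::ₘ b ::ₘ 0 : Multiset Int) := by
          simp [eq_comm]
          exact ⟨hax, hbx⟩
        rw [← Multiset.cons_coe, Multiset.le_cons_of_notMem hxnot] at h
        exact Or.inr (ih h)

lemma pair_of_mem_pairProds {p : Int} : ∀ (l : List Int), p ∈ pairProds l →
    ∃ a b : Int, p = a * b ∧ (a ::ₘ b ::ₘ 0) ≤ (l : Multiset Int) := by
  intro l
  induction l with
  | nil => intro h; simp [pairProds] at h
  | cons x xs ih =>
    intro h
    simp only [pairProds, List.mem_append, List.mem_map] at h
    rcases h with ⟨y, hy, rfl⟩ | h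
    · refine ⟨x, y, rfl, ?_⟩
      rw [← Multiset.cons_coe, Multiset.cons_le_cons_iff]
      simpa using hy
    · obtain ⟨a, b, rfl, hab⟩ := ih h
      refine ⟨a, b, rfl, le_trans hab ?_⟩
      rw [← Multiset.cons_coe]
      exact Multiset.le_cons_self _ _

lemma pair_le_of_mem_ne {a b : Int} {m : Multiset Int} (ha : a ∈ m) (hb : b ∈ m)
    (hne : a ≠ b) : (a ::ₘ b ::ₘ 0) ≤ m := by
  have hb' : b ∈ m.erase a := Multiset.mem_erase_of_ne (Ne.symm hne) |>.2 hb
  calc a ::ₘ b ::ₘ 0 ≤ a ::ₘ m.erase a := by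
        rw [Multiset.cons_le_cons_iff]
        simpa using hb'
    _ = m := Multiset.cons_erase ha

-- ---- facts from the invariants ----

lemma mem_le_top {m : Multiset Int} {h1 h2 a : Int} (ht : Top2 m h1 h2) (ha : a ∈ m) :
    a ≤ h1 := by
  obtain ⟨h21, r, rfl, hr⟩ := ht
  rcases Multiset.mem_cons.1 ha with rfl | ha
  · exact le_refl _
  rcases Multiset.mem_cons.1 ha with rfl | ha
  · exact h21
  · exact le_trans (hr a ha) h21

lemma low_le_mem {m : Multiset Int} {l1 l2 a : Int} (hl : Low2 m l1 l2) (ha : a ∈ m) :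
    l1 ≤ a := by
  obtain ⟨h12, r, rfl, hr⟩ := hl
  rcases Multiset.mem_cons.1 ha with rfl | ha
  · exact le_refl _
  rcases Multiset.mem_cons.1 ha with rfl | ha
  · exact h12
  · exact le_trans h12 (hr a ha)

lemma pair_one_le_h2 {m : Multiset Int} {h1 h2 a b : Int} (ht : Top2 m h1 h2)
    (hab : (a ::ₘ b ::ₘ 0) ≤ m) : a ≤ h2 ∨ b ≤ h2 := by
  by_contra hc
  push Not at hc
  obtain ⟨ha2, hb2⟩ := hc
  obtain ⟨h21, r, rfl, hr⟩ := ht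
  have hf := Multiset.card_le_card
    (Multiset.filter_le_filter (fun z => h2 < z) hab)
  have hfa : Multiset.filter (fun z => h2 < z) (a ::ₘ b ::ₘ 0) = a ::ₘ b ::ₘ 0 := by
    rw [Multiset.filter_eq_self]
    intro x hx
    rcases Multiset.mem_cons.1 hx with rfl | hx
    · exact ha2
    rcases Multiset.mem_cons.1 hx with rfl | hx
    · exact hb2
    · simp at hx
  have h2f : Multiset.filter (fun z => h2 < z) (h2 ::ₘ r) = 0 := by
    rw [Multiset.filter_eq_nil]
    intro x hx
    rcases Multiset.mem_cons.1 hx with rfl | hx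
    · exact lt_irrefl _
    · exact not_lt.2 (hr x hx)
  rw [hfa, Multiset.filter_cons, h2f] at hf
  by_cases hh : h2 < h1 <;> simp [hh] at hf

lemma pair_l2_le {m : Multiset Int} {l1 l2 a b : Int} (hl : Low2 m l1 l2)
    (hab : (a ::ₘ b ::ₘ 0) ≤ m) : l2 ≤ a ∨ l2 ≤ b := by
  by_contra hc
  push Not at hc
  obtain ⟨ha2, hb2⟩ := hc
  obtain ⟨h12, r, rfl, hr⟩ := hl
  have hf := Multiset.card_le_card
    (Multiset.filter_le_filter (fun z => z < l2) hab)
  have hfa : Multiset.filter (fun z => z < l2) (a ::ₘ b ::ₘ 0) = a ::ₘ b ::ₘ 0 := by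
    rw [Multiset.filter_eq_self]
    intro x hx
    rcases Multiset.mem_cons.1 hx with rfl | hx
    · exact ha2
    rcases Multiset.mem_cons.1 hx with rfl | hx
    · exact hb2
    · simp at hx
  have h2f : Multiset.filter (fun z => z < l2) (l2 ::ₘ r) = 0 := by
    rw [Multiset.filter_eq_nil]
    intro x hx
    rcases Multiset.mem_cons.1 hx with rfl | hx
    · exact lt_irrefl _
    · exact not_lt.2 (hr x hx)
  rw [hfa, Multiset.filter_cons, h2f] at hf
  by_cases hh : l1 < l2 <;> simp [hh] at hf

lemma card_two_of_split {m : Multiset Int} {h1 h2 l1 l2 : Int} (ht : Top2 m h1 h2)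
    (hl : Low2 m l1 l2) (hneg : h2 < 0) (hpos : 0 < l2) : m = h1 ::ₘ h2 ::ₘ 0 := by
  obtain ⟨h21, r, hm, hr⟩ := ht
  obtain ⟨h12, r', hm', hr'⟩ := hl
  have hrz : r = 0 := by
    have hcard : (Multiset.filter (fun z => z < 0) m).card ≤ 1 := by
      rw [hm', Multiset.filter_cons, Multiset.filter_cons]
      have : Multiset.filter (fun z => z < 0) r' = 0 := by
        rw [Multiset.filter_eq_nil]
        intro x hx
        exact not_lt.2 (le_trans (le_of_lt hpos) (hr' x hx))
      rw [this]
      have hl2 : ¬ (l2 < 0) := not_lt.2 (le_of_lt hpos)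
      by_cases hl1 : l1 < 0 <;> simp [hl1, hl2]
    have hcard2 : 1 + r.card ≤ (Multiset.filter (fun z => z < 0) m).card := by
      rw [hm, Multiset.filter_cons, Multiset.filter_cons]
      have : Multiset.filter (fun z => z < 0) r = r := by
        rw [Multiset.filter_eq_self]
        intro x hx
        exact lt_of_le_of_lt (hr x hx) hneg
      rw [this]
      by_cases hh1 : h1 < 0 <;> simp [hh1, hneg] <;> omega
    have : r.card = 0 := by omega
    exact Multiset.card_eq_zero.mp this
  rw [hm, hrz]

-- ---- the two extremal-product bounds ----

lemma pair_le_max_aux {m : Multiset Int} {h1 h2 l1 l2 a b : Int} (ht : Top2 m h1 h2)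
    (hl : Low2 m l1 l2) (hab : (a ::ₘ b ::ₘ 0) ≤ m) (hord : a ≤ b) :
    a * b ≤ max (h1 * h2) (l1 * l2) := by
  have hbh1 : b ≤ h1 := mem_le_top ht (Multiset.mem_of_le hab (by simp))
  have hal1 : l1 ≤ a := low_le_mem hl (Multiset.mem_of_le hab (by simp))
  have hah2 : a ≤ h2 := by
    rcases pair_one_le_h2 ht hab with h | h
    · exact h
    · exact le_trans hord h
  have hbl2 : l2 ≤ b := by
    rcases pair_l2_le hl hab with h | h
    · exact le_trans h hord
    · exact h
  rcases le_or_gt 0 a with ha0 | ha0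
  · -- 0 ≤ a ≤ b : bounded by h1 * h2
    refine le_trans ?_ (le_max_left _ _)
    have h2nn : 0 ≤ h2 := le_trans ha0 hah2
    have bnn : 0 ≤ b := le_trans ha0 hord
    calc a * b ≤ h2 * b := mul_le_mul_of_nonneg_right hah2 bnn
      _ ≤ h2 * h1 := mul_le_mul_of_nonneg_left hbh1 h2nn
      _ = h1 * h2 := mul_comm _ _
  · rcases le_or_gt b 0 with hb0 | hb0
    · -- a ≤ b ≤ 0 : bounded by l1 * l2
      refine le_trans ?_ (le_max_right _ _)
      have ha0' : a ≤ 0 := le_trans hord hb0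
      have hl10 : l1 ≤ 0 := le_trans hal1 ha0'
      nlinarith [mul_nonneg (sub_nonneg.2 hal1) (neg_nonneg.2 hb0),
        mul_nonneg (sub_nonneg.2 hbl2) (neg_nonneg.2 hl10)]
    · -- a < 0 < b
      rcases le_or_gt l2 0 with hl20 | hl20
      · refine le_trans ?_ (le_max_right _ _)
        have hl10 : l1 ≤ 0 := le_of_lt (lt_of_le_of_lt hal1 ha0)
        nlinarith [mul_nonneg (neg_nonneg.2 hl10) (neg_nonneg.2 hl20),
          mul_pos (neg_pos.2 ha0) hb0]
      · rcases le_or_gt 0 h2 with hh20 | hh20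
        · refine le_trans ?_ (le_max_left _ _)
          have hh10 : 0 ≤ h1 := le_trans (le_of_lt hb0) hbh1
          nlinarith [mul_nonneg hh10 hh20, mul_pos (neg_pos.2 ha0) hb0]
        · -- h2 < 0 < l2 : the multiset has exactly two elements
          have hm2 := card_two_of_split ht hl hh20 hl20
          rw [hm2] at hab
          have hcard : (h1 ::ₘ h2 ::ₘ (0 : Multiset Int)).card ≤ (a ::ₘ b ::ₘ 0).card := by
            simp
          have heq := Multiset.eq_of_le_of_card_le hab hcard
          have hprod : a * b = h1 * h2 := by
            have := congrArg Multiset.prod heq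
            simpa using this
          rw [hprod]
          exact le_max_left _ _

lemma min_le_pair_aux {m : Multiset Int} {h1 h2 l1 l2 a b : Int} (ht : Top2 m h1 h2)
    (hl : Low2 m l1 l2) (hab : (a ::ₘ b ::ₘ 0) ≤ m) (hord : a ≤ b) :
    min (l1 * l2) (min (l1 * h1) (h1 * h2)) ≤ a * b := by
  have hbh1 : b ≤ h1 := mem_le_top ht (Multiset.mem_of_le hab (by simp))
  have hal1 : l1 ≤ a := low_le_mem hl (Multiset.mem_of_le hab (by simp))
  have hah2 : a ≤ h2 := by
    rcases pair_one_le_h2 ht hab with h | h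
    · exact h
    · exact le_trans hord h
  have hbl2 : l2 ≤ b := by
    rcases pair_l2_le hl hab with h | h
    · exact le_trans h hord
    · exact h
  have hcross : min (l1 * l2) (min (l1 * h1) (h1 * h2)) ≤ l1 * h1 :=
    le_trans (min_le_right _ _) (min_le_left _ _)
  rcases le_or_gt 0 a with ha0 | ha0
  · rcases le_or_gt 0 l1 with hl10 | hl10
    · -- all relevant values nonnegative : l1 * l2 works
      refine le_trans (min_le_left _ _) ?_
      have hl20 : 0 ≤ l2 := le_trans hl10 hl.1
      calc l1 * l2 ≤ a * l2 := mul_le_mul_of_nonneg_right hal1 hl20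
        _ ≤ a * b := mul_le_mul_of_nonneg_left hbl2 ha0
    · -- l1 negative : l1 * h1 ≤ 0 ≤ a * b
      refine le_trans hcross ?_
      have hh10 : 0 ≤ h1 := le_trans (le_trans ha0 hord) hbh1
      nlinarith [mul_nonneg ha0 (le_trans ha0 hord)]
  · rcases le_or_gt b 0 with hb0 | hb0
    · rcases le_or_gt h1 0 with hh10 | hh10
      · -- everything nonpositive : h1 * h2 works
        refine le_trans (le_trans (min_le_right _ _) (min_le_right _ _)) ?_
        have ha0' : a ≤ 0 := le_trans hord hb0
        nlinarith [mul_nonneg (sub_nonneg.2 hbh1) (neg_nonneg.2 ha0'),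
          mul_nonneg (sub_nonneg.2 hah2) (neg_nonneg.2 hh10)]
      · -- h1 positive : l1 * h1 ≤ 0 ≤ a * b
        refine le_trans hcross ?_
        have ha0' : a ≤ 0 := le_trans hord hb0
        have hl10 : l1 ≤ 0 := le_trans hal1 ha0'
        nlinarith [mul_nonneg (neg_nonneg.2 ha0') (neg_nonneg.2 hb0)]
    · -- a < 0 < b : l1 * h1 works
      refine le_trans hcross ?_
      have hh1pos : 0 < h1 := lt_of_lt_of_le hb0 hbh1
      nlinarith [mul_nonneg (sub_nonneg.2 hbh1) (neg_nonneg.2 (le_of_lt ha0)),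
        mul_nonneg (sub_nonneg.2 hal1) (le_of_lt hh1pos)]

lemma pair_le_max {m : Multiset Int} {h1 h2 l1 l2 a b : Int} (ht : Top2 m h1 h2)
    (hl : Low2 m l1 l2) (hab : (a ::ₘ b ::ₘ 0) ≤ m) :
    a * b ≤ max (h1 * h2) (l1 * l2) := by
  rcases le_total a b with hord | hord
  · exact pair_le_max_aux ht hl hab hord
  · rw [mul_comm a b]
    rw [Multiset.cons_swap] at hab
    exact pair_le_max_aux ht hl hab hord

lemma min_le_pair {m : Multiset Int} {h1 h2 l1 l2 a b : Int} (ht : Top2 m h1 h2)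
    (hl : Low2 m l1 l2) (hab : (a ::ₘ b ::ₘ 0) ≤ m) :
    min (l1 * l2) (min (l1 * h1) (h1 * h2)) ≤ a * b := by
  rcases le_total a b with hord | hord
  · exact min_le_pair_aux ht hl hab hord
  · rw [mul_comm a b]
    rw [Multiset.cons_swap] at hab
    exact min_le_pair_aux ht hl hab hord

-- ---- achievability of the candidates ----

lemma top_prod_mem {nums : List Int} {h1 h2 : Int} (ht : Top2 (↑nums) h1 h2) :
    h1 * h2 ∈ pairProds nums := by
  obtain ⟨h21, r, hm, hr⟩ := ht
  apply pairProds_mem_of_le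
  rw [hm]
  exact Multiset.cons_le_cons _ (Multiset.cons_le_cons _ (Multiset.zero_le _))

lemma low_prod_mem {nums : List Int} {l1 l2 : Int} (hl : Low2 (↑nums) l1 l2) :
    l1 * l2 ∈ pairProds nums := by
  obtain ⟨h12, r, hm, hr⟩ := hl
  apply pairProds_mem_of_le
  rw [hm]
  exact Multiset.cons_le_cons _ (Multiset.cons_le_cons _ (Multiset.zero_le _))

lemma cross_prod_mem {nums : List Int} {h1 h2 l1 l2 : Int} (ht : Top2 (↑nums) h1 h2)
    (hl : Low2 (↑nums) l1 l2) : l1 * h1 ∈ pairProds nums ∨ l1 * h1 = h1 * h2 := by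
  by_cases hlh : l1 = h1
  · right
    obtain ⟨h21, r, hm, hr⟩ := ht
    have hh2m : h2 ∈ (↑nums : Multiset Int) := by rw [hm]; simp
    have h1' : l1 ≤ h2 := low_le_mem hl hh2m
    have h2' : h2 ≤ h1 := h21
    have : h2 = h1 := le_antisymm h2' (hlh ▸ h1')
    rw [this, hlh]
  · left
    obtain ⟨h21, r, hm, hr⟩ := ht
    obtain ⟨h12, r', hm', hr'⟩ := hl
    have hl1m : l1 ∈ (↑nums : Multiset Int) := by rw [hm']; simp
    have hh1m : h1 ∈ (↑nums : Multiset Int) := by rw [hm]; simp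
    exact pairProds_mem_of_le nums (pair_le_of_mem_ne hl1m hh1m hlh)

-- ---- B's pass establishes the invariants ----

lemma step_inv {m : Multiset Int} {st : Int × Int × Int × Int} (v : Int)
    (ht : Top2 m st.1 st.2.1) (hl : Low2 m st.2.2.1 st.2.2.2) :
    Top2 (v ::ₘ m) (stepB st v).1 (stepB st v).2.1 ∧
    Low2 (v ::ₘ m) (stepB st v).2.2.1 (stepB st v).2.2.2 := by
  obtain ⟨h1, h2, l1, l2⟩ := st
  constructor
  · obtain ⟨h21, r, rfl, hr⟩ := ht
    by_cases hv1 : h1 ≤ v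
    · refine ⟨by simp [stepB, hv1], h2 ::ₘ r, by simp [stepB, hv1], ?_⟩
      intro x hx
      simp [stepB, hv1]
      rcases Multiset.mem_cons.1 hx with rfl | hx
      · exact h21
      · exact le_trans (hr x hx) h21
    · by_cases hv2 : h2 < v
      · refine ⟨by simp [stepB, hv1, hv2]; omega, h2 ::ₘ r, ?_, ?_⟩
        · simp [stepB, hv1, hv2]
          rw [Multiset.cons_swap]
        · intro x hx
          simp [stepB, hv1, hv2]
          rcases Multiset.mem_cons.1 hx with rfl | hx
          · exact le_of_lt hv2
          · exact le_trans (hr x hx) (le_of_lt hv2)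
      · refine ⟨by simp [stepB, hv1, hv2]; exact h21, v ::ₘ r, ?_, ?_⟩
        · simp [stepB, hv1, hv2]
          rw [Multiset.cons_swap v h1, Multiset.cons_swap v h2]
        · intro x hx
          simp [stepB, hv1, hv2]
          rcases Multiset.mem_cons.1 hx with rfl | hx
          · omega
          · exact hr x hx
  · obtain ⟨h12, r, rfl, hr⟩ := hl
    by_cases hv1 : v ≤ l1
    · refine ⟨by simp [stepB, hv1], l2 ::ₘ r, by simp [stepB, hv1], ?_⟩
      intro x hx
      simp [stepB, hv1]
      rcases Multiset.mem_cons.1 hx with rfl | hx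
      · exact h12
      · exact le_trans h12 (hr x hx)
    · by_cases hv2 : v < l2
      · refine ⟨by simp [stepB, hv1, hv2]; omega, l2 ::ₘ r, ?_, ?_⟩
        · simp [stepB, hv1, hv2]
          rw [Multiset.cons_swap]
        · intro x hx
          simp [stepB, hv1, hv2]
          rcases Multiset.mem_cons.1 hx with rfl | hx
          · exact le_of_lt hv2
          · exact le_trans (le_of_lt hv2) (hr x hx)
      · refine ⟨by simp [stepB, hv1, hv2]; exact h12, v ::ₘ r, ?_, ?_⟩
        · simp [stepB, hv1, hv2]
          rw [Multiset.cons_swap v l1, Multiset.cons_swap v l2]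
        · intro x hx
          simp [stepB, hv1, hv2]
          rcases Multiset.mem_cons.1 hx with rfl | hx
          · omega
          · exact hr x hx

lemma fold_inv : ∀ (rest : List Int) (m : Multiset Int) (st : Int × Int × Int × Int),
    Top2 m st.1 st.2.1 → Low2 m st.2.2.1 st.2.2.2 →
    Top2 (m + ↑rest) (rest.foldl stepB st).1 (rest.foldl stepB st).2.1 ∧
    Low2 (m + ↑rest) (rest.foldl stepB st).2.2.1 (rest.foldl stepB st).2.2.2 := by
  intro rest
  induction rest with
  | nil =>
    intro m st ht hl
    simpa using ⟨ht, hl⟩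
  | cons v rest ih =>
    intro m st ht hl
    have hs := step_inv v ht hl
    have := ih (v ::ₘ m) (stepB st v) hs.1 hs.2
    simpa [← Multiset.cons_coe, Multiset.add_cons] using this

-- ---- the extremes of pairProds in terms of the invariants ----

lemma le_foldl_max_of_mem {p q : Int} {T : List Int} (h : p ∈ q :: T) :
    p ≤ T.foldl max q := by
  rcases List.mem_cons.1 h with h | h
  · exact h ▸ (PySem.List.le_foldl_max T q).1
  · exact (PySem.List.le_foldl_max T q).2 p h

lemma foldl_min_le_of_mem {p q : Int} {T : List Int} (h : p ∈ q :: T) :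
    T.foldl min q ≤ p := by
  rcases List.mem_cons.1 h with h | h
  · exact h ▸ (PySem.List.foldl_min_le T q).1
  · exact (PySem.List.foldl_min_le T q).2 p h

lemma foldl_max_eq {nums : List Int} {h1 h2 l1 l2 q : Int} {T : List Int}
    (ht : Top2 (↑nums) h1 h2) (hl : Low2 (↑nums) l1 l2)
    (hpp : pairProds nums = q :: T) :
    T.foldl max q = max (h1 * h2) (l1 * l2) := by
  apply le_antisymm
  · have hmem : T.foldl max q ∈ q :: T := by
      rcases PySem.List.foldl_max_mem T q with h | h
      · simp [h]
      · exact List.mem_cons_of_mem _ h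
    rw [← hpp] at hmem
    obtain ⟨a, b, heq, hab⟩ := pair_of_mem_pairProds nums hmem
    rw [heq]
    exact pair_le_max ht hl hab
  · rcases max_cases (h1 * h2) (l1 * l2) with ⟨hm, _⟩ | ⟨hm, _⟩ <;> rw [hm]
    · have := top_prod_mem ht
      rw [hpp] at this
      exact le_foldl_max_of_mem this
    · have := low_prod_mem hl
      rw [hpp] at this
      exact le_foldl_max_of_mem this

lemma foldl_min_eq {nums : List Int} {h1 h2 l1 l2 q : Int} {T : List Int}
    (ht : Top2 (↑nums) h1 h2) (hl : Low2 (↑nums) l1 l2)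
    (hpp : pairProds nums = q :: T) :
    T.foldl min q = min (l1 * l2) (min (l1 * h1) (h1 * h2)) := by
  apply le_antisymm
  · have hle : min (l1 * l2) (min (l1 * h1) (h1 * h2)) ≤ l1 * l2 ∧
        min (l1 * l2) (min (l1 * h1) (h1 * h2)) ≤ l1 * h1 ∧
        min (l1 * l2) (min (l1 * h1) (h1 * h2)) ≤ h1 * h2 :=
      ⟨min_le_left _ _, le_trans (min_le_right _ _) (min_le_left _ _),
        le_trans (min_le_right _ _) (min_le_right _ _)⟩
    have hmemof : ∀ p : Int, p ∈ pairProds nums → T.foldl min q ≤ p := by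
      intro p hp
      rw [hpp] at hp
      exact foldl_min_le_of_mem hp
    rcases min_cases (l1 * l2) (min (l1 * h1) (h1 * h2)) with ⟨hm, _⟩ | ⟨hm, _⟩
    · rw [hm]
      exact hmemof _ (low_prod_mem hl)
    · rw [hm]
      rcases min_cases (l1 * h1) (h1 * h2) with ⟨hm2, _⟩ | ⟨hm2, _⟩ <;> rw [hm2]
      · rcases cross_prod_mem ht hl with h | h
        · exact hmemof _ h
        · rw [h]
          exact hmemof _ (top_prod_mem ht)
      · exact hmemof _ (top_prod_mem ht)
  · have hmem : T.foldl min q ∈ q :: T := by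
      rcases PySem.List.foldl_min_mem T q with h | h
      · simp [h]
      · exact List.mem_cons_of_mem _ h
    rw [← hpp] at hmem
    obtain ⟨a, b, heq, hab⟩ := pair_of_mem_pairProds nums hmem
    rw [heq]
    exact min_le_pair ht hl hab

-- ===== VERDICT (by name: the statement is the Claim_ definition above) =====
theorem maxProductDifference_spec : Claim_equal_maxProductDifference := by
  intro nums _ hpre
  unfold Spec_maxProductDifference
  obtain ⟨x, y, rest, rfl⟩ : ∃ x y rest, nums = x :: y :: rest := by
    match nums, hpre with
    | [], h => exact absurd h (by simp [Pre_maxProductDifference])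
    | [x], h => exact absurd h (by simp [Pre_maxProductDifference])
    | x :: y :: rest, _ => exact ⟨x, y, rest, rfl⟩
  -- A's nested loops compute the fold of stepP over pairProds
  have h0 := outerA (x :: y :: rest) (x :: y :: rest).length 0
    ((none, none) : Option Int × Option Int) (by simp)
  rw [Nat.cast_zero, List.drop_zero, auxA_eq_pairProds] at h0
  have hpp : pairProds (x :: y :: rest)
      = (x * y) :: (rest.map (fun z => x * z) ++ pairProds (y :: rest)) := by
    simp [pairProds]
  have hfold : (pairProds (x :: y :: rest)).foldl stepP
        ((none, none) : Option Int × Option Int)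
      = (some ((rest.map (fun z => x * z) ++ pairProds (y :: rest)).foldl max (x * y)),
         some ((rest.map (fun z => x * z) ++ pairProds (y :: rest)).foldl min (x * y))) := by
    rw [hpp]
    simp only [List.foldl_cons]
    exact foldl_stepP_some _ (x * y) (x * y)
  have hA : maxProductDifference (x :: y :: rest)
      = (rest.map (fun z => x * z) ++ pairProds (y :: rest)).foldl max (x * y)
        - (rest.map (fun z => x * z) ++ pairProds (y :: rest)).foldl min (x * y) := by
    simp only [maxProductDifference]
    rw [h0, hfold]
  -- B's single pass establishes the two-largest / two-smallest invariants
  have hinit_top : Top2 (x ::ₘ y ::ₘ 0) (if y ≤ x then (x, y) else (y, x)).1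
      (if y ≤ x then (x, y) else (y, x)).2 := by
    by_cases h : y ≤ x
    · rw [if_pos h]
      exact ⟨h, 0, rfl, by simp⟩
    · rw [if_neg h]
      exact ⟨le_of_not_ge h, 0, Multiset.cons_swap x y 0, by simp⟩
  have hinit_low : Low2 (x ::ₘ y ::ₘ 0) (if x ≤ y then (x, y) else (y, x)).1
      (if x ≤ y then (x, y) else (y, x)).2 := by
    by_cases h : x ≤ y
    · rw [if_pos h]
      exact ⟨h, 0, rfl, by simp⟩
    · rw [if_neg h]
      exact ⟨le_of_not_ge h, 0, Multiset.cons_swap x y 0, by simp⟩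
  have hfi := fold_inv rest (x ::ₘ y ::ₘ 0)
    ((if y ≤ x then (x, y) else (y, x)).1, (if y ≤ x then (x, y) else (y, x)).2,
     (if x ≤ y then (x, y) else (y, x)).1, (if x ≤ y then (x, y) else (y, x)).2)
    hinit_top hinit_low
  have hm : (x ::ₘ y ::ₘ 0) + (↑rest : Multiset Int) = (↑(x :: y :: rest) : Multiset Int) := by
    simp [← Multiset.cons_coe, Multiset.cons_add]
  rw [hm] at hfi
  rw [hA, foldl_max_eq hfi.1 hfi.2 hpp, foldl_min_eq hfi.1 hfi.2 hpp]
  rfl
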